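-- pv_equiv track=rewrite | github.com/penni-ai/penni-ai-platform | functions/stage_utils.py | normalize_completed_stages
-- ===== SOURCE A (Python) =====
-- from typing import Any, Dict, Generator, Iterable, List, Optional, Sequence
--
-- STAGE_ORDER = ["SEARCH", "BRIGHTDATA", "LLM_FIT"]
--
-- def normalize_completed_stages(existing: Iterable[str], stage: Optional[str]) -> List[str]:
--     order_map = {name: idx for idx, name in enumerate(STAGE_ORDER)}
--     seen: Dict[str, bool] = {}
--     normalized: List[str] = []
--     for name in existing:
--         upper = name.upper()
--         if upper not in seen:
--             seen[upper] = True
--             normalized.append(upper)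
--     if stage:
--         upper_stage = stage.upper()
--         if upper_stage not in seen:
--             normalized.append(upper_stage)
--     normalized.sort(key=lambda item: order_map.get(item, len(order_map)))
--     return normalized
-- ===== SOURCE B (Python) =====
-- STAGE_ORDER = ["SEARCH", "BRIGHTDATA", "LLM_FIT"]
--
-- def normalize_completed_stages(existing, stage):
--     normalized = []
--     for name in existing:
--         u = name.upper()
--         if u not in normalized:
--             normalized.append(u)
--     if stage:
--         u = stage.upper()
--         if u not in normalized:
--             normalized.append(u)
--     known = [s for s in STAGE_ORDER if s in normalized]
--     unknown = [x for x in normalized if x not in STAGE_ORDER]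
--     return known + unknown
-- ===== Notes on version B (the rewrite author's own statement) =====
-- stated objective: simpler
-- what changed: Replaced the order_map dict, the seen dict and the final stable sort by a list-membership dedup followed by a two-bucket partition: known stages emitted in STAGE_ORDER order, then unknown names in insertion order.
import Mathlib
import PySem

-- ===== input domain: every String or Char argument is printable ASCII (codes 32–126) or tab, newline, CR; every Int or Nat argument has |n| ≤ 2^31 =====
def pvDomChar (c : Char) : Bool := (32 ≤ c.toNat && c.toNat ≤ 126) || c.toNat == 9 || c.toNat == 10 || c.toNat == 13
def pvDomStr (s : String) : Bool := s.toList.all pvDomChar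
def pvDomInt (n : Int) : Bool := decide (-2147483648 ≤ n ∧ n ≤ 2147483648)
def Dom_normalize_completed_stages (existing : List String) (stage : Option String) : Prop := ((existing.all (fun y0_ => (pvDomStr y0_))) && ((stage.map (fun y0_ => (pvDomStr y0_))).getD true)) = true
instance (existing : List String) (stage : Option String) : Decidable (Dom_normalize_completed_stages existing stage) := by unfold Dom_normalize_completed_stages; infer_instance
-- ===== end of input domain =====

-- B replaces A's seen-dict dedup plus stable sort under an order_map dict by a list-membership
-- dedup plus a two-bucket partition (known stages in STAGE_ORDER order, then unknowns in
-- insertion order): simpler, no dicts, no sort.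

-- ===== PORT A =====
def STAGE_ORDER : List String := ["SEARCH", "BRIGHTDATA", "LLM_FIT"]

-- the body of A's 'for name in existing' loop
def pvStepA (st : PySem.Dict String Bool × List String) (name : String) :
    PySem.Dict String Bool × List String :=
  let u := PySem.Str.upper name
  if !(st.1.contains u) then (st.1.insert u true, st.2 ++ [u]) else st

def normalize_completed_stages (existing : List String) (stage : Option String) : List String :=
  let order_map : PySem.Dict String Int :=
    (PySem.List.enumerate STAGE_ORDER).foldl (fun d p => d.insert p.2 p.1) PySem.Dict.empty
  let st := existing.foldl pvStepA (PySem.Dict.empty, [])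
  let normalized :=
    match stage with
    | none => st.2
    | some s =>
        if s = "" then st.2
        else
          let u := PySem.Str.upper s
          if !(st.1.contains u) then st.2 ++ [u] else st.2
  PySem.List.sorted normalized (fun item => order_map.getD item (order_map.size : Int)) false

-- ===== PORT B =====
-- the body of B's dedup loop
def pvStepB (n : List String) (name : String) : List String :=
  let u := PySem.Str.upper name
  if u ∉ n then n ++ [u] else n

def normalize_completed_stages_alt (existing : List String) (stage : Option String) : List String :=
  let normalized := existing.foldl pvStepB []
  let normalized :=
    match stage with
    | none => normalized
    | some s =>
        if s = "" then normalized
        else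
          let u := PySem.Str.upper s
          if u ∉ normalized then normalized ++ [u] else normalized
  let known := STAGE_ORDER.filter (fun s => s ∈ normalized)
  let unknown := normalized.filter (fun x => x ∉ STAGE_ORDER)
  known ++ unknown

-- ===== PRECONDITION & SPEC =====
def Spec_normalize_completed_stages (existing : List String) (stage : Option String) (out : List String) : Prop := out = normalize_completed_stages_alt existing stage
instance (existing : List String) (stage : Option String) (out : List String) : Decidable (Spec_normalize_completed_stages existing stage out) := by unfold Spec_normalize_completed_stages; infer_instance

-- ===== CLAIM (what is proved, stated in full; the proofs are below) =====
def Claim_equal_normalize_completed_stages : Prop := ∀ (existing : List String) (stage : Option String), Dom_normalize_completed_stages existing stage → Spec_normalize_completed_stages existing stage (normalize_completed_stages existing stage)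

-- ===== LEMMAS AND PROOFS =====

-- A's sort key, in closed form
def pvKey (item : String) : Int :=
  if item = "SEARCH" then 0 else if item = "BRIGHTDATA" then 1 else if item = "LLM_FIT" then 2 else 3

lemma pvKeyA_eq :
    (fun item => (((PySem.List.enumerate STAGE_ORDER).foldl (fun d p => d.insert p.2 p.1)
        PySem.Dict.empty : PySem.Dict String Int)).getD item
        ((((PySem.List.enumerate STAGE_ORDER).foldl (fun d p => d.insert p.2 p.1)
        PySem.Dict.empty : PySem.Dict String Int)).size : Int)) = pvKey := by
  have hmk : ((PySem.List.enumerate STAGE_ORDER).foldl (fun d p => d.insert p.2 p.1)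
      PySem.Dict.empty : PySem.Dict String Int)
      = PySem.Dict.mk [("SEARCH", 0), ("BRIGHTDATA", 1), ("LLM_FIT", 2)] := by rfl
  funext item
  rw [hmk]
  unfold pvKey
  by_cases h1 : item = "SEARCH"
  · subst h1; rfl
  · by_cases h2 : item = "BRIGHTDATA"
    · subst h2; rfl
    · by_cases h3 : item = "LLM_FIT"
      · subst h3; rfl
      · have n1 : ("SEARCH" == item) = false := by
          simp only [beq_eq_false_iff_ne]; exact fun e => h1 e.symm
        have n2 : ("BRIGHTDATA" == item) = false := by
          simp only [beq_eq_false_iff_ne]; exact fun e => h2 e.symm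
        have n3 : ("LLM_FIT" == item) = false := by
          simp only [beq_eq_false_iff_ne]; exact fun e => h3 e.symm
        simp [PySem.Dict.getD_eq_get?_getD, n1, n2, n3, h1, h2, h3, PySem.Dict.size,
          PySem.Dict.get?]

-- the two dedup loops agree, and the seen-dict stays in sync with the output list
lemma pvLoops (xs : List String) (d : PySem.Dict String Bool) (n : List String)
    (h : ∀ u, d.contains u = true ↔ u ∈ n) :
    (xs.foldl pvStepA (d, n)).2 = xs.foldl pvStepB n ∧
    (∀ u, (xs.foldl pvStepA (d, n)).1.contains u = true ↔ u ∈ (xs.foldl pvStepA (d, n)).2) := by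
  induction xs generalizing d n with
  | nil => exact ⟨rfl, h⟩
  | cons x xs ih =>
      simp only [List.foldl_cons, pvStepA, pvStepB]
      by_cases hm : PySem.Str.upper x ∈ n
      · have hc : d.contains (PySem.Str.upper x) = true := (h _).mpr hm
        rw [hc, Bool.not_true, if_neg (by simp), if_neg (not_not_intro hm)]
        exact ih d n h
      · have hc : d.contains (PySem.Str.upper x) = false := by
          cases hcc : d.contains (PySem.Str.upper x)
          · rfl
          · exact absurd ((h _).mp hcc) hm
        rw [hc, Bool.not_false, if_pos rfl, if_pos hm]
        refine ih _ _ (fun v => ?_)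
        rw [PySem.Dict.contains_insert]
        simp [List.mem_append, h v, or_comm, eq_comm (a := v)]

lemma pvNodupB (xs : List String) (n : List String) (hn : n.Nodup) :
    (xs.foldl pvStepB n).Nodup := by
  induction xs generalizing n with
  | nil => exact hn
  | cons x xs ih =>
      simp only [List.foldl_cons, pvStepB]
      by_cases hm : PySem.Str.upper x ∈ n
      · rw [if_neg (not_not_intro hm)]
        exact ih n hn
      · rw [if_pos hm]
        exact ih _ (by simp [List.nodup_append, hn]; exact fun a ha e => hm (e ▸ ha))

lemma pvKey_le (y : String) : pvKey y ≤ 3 := by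
  unfold pvKey; split_ifs <;> omega
lemma pvKey_unknown (y : String) (h : y ∉ STAGE_ORDER) : pvKey y = 3 := by
  simp [STAGE_ORDER] at h
  simp [pvKey, h.1, h.2.1, h.2.2]
lemma pvInsertBy_cons {α : Type} (p : α → α → Bool) (x y : α) (ys : List α) :
    PySem.List.insertBy p x (y :: ys) =
      if p x y then x :: y :: ys else y :: PySem.List.insertBy p x ys := rfl
lemma pvInsertBy_unknowns (x : String) (hk : pvKey x < 3) (f1 : List String)
    (hf : ∀ y ∈ f1, y ∉ STAGE_ORDER) :
    PySem.List.insertBy (fun a b => decide (pvKey a < pvKey b)) x f1 = x :: f1 := by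
  cases f1 with
  | nil => rfl
  | cons h t =>
      rw [pvInsertBy_cons]
      have : pvKey h = 3 := pvKey_unknown h (hf h (by simp))
      simp [this, hk]
lemma pvFilt (q : List String) : STAGE_ORDER.filter (fun s => decide (s ∈ q)) =
    ((if "SEARCH" ∈ q then ["SEARCH"] else []) ++ (if "BRIGHTDATA" ∈ q then ["BRIGHTDATA"] else [])
      ++ (if "LLM_FIT" ∈ q then ["LLM_FIT"] else [])) := by
  simp only [STAGE_ORDER, List.filter_cons, List.filter_nil]
  split_ifs <;> simp_all
lemma pvdSB : decide (pvKey "SEARCH" < pvKey "BRIGHTDATA") = true := by decide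
lemma pvdSL : decide (pvKey "SEARCH" < pvKey "LLM_FIT") = true := by decide
lemma pvdBS : decide (pvKey "BRIGHTDATA" < pvKey "SEARCH") = false := by decide
lemma pvdBL : decide (pvKey "BRIGHTDATA" < pvKey "LLM_FIT") = true := by decide
lemma pvdLS : decide (pvKey "LLM_FIT" < pvKey "SEARCH") = false := by decide
lemma pvdLB : decide (pvKey "LLM_FIT" < pvKey "BRIGHTDATA") = false := by decide
lemma pvkS : pvKey "SEARCH" < 3 := by decide
lemma pvkB : pvKey "BRIGHTDATA" < 3 := by decide
lemma pvkL : pvKey "LLM_FIT" < 3 := by decide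

lemma pvInsert_step (x : String) (q : List String) (hq : x ∉ q) :
    PySem.List.insertBy (fun a b => decide (pvKey a < pvKey b)) x
        (STAGE_ORDER.filter (fun s => decide (s ∈ q)) ++ q.filter (fun y => decide (y ∉ STAGE_ORDER)))
      = STAGE_ORDER.filter (fun s => decide (s ∈ q ++ [x]))
        ++ (q ++ [x]).filter (fun y => decide (y ∉ STAGE_ORDER)) := by
  have hf1 : ∀ y ∈ q.filter (fun y => decide (y ∉ STAGE_ORDER)), y ∉ STAGE_ORDER := by
    intro y hy
    simpa using (List.of_mem_filter hy)
  by_cases hx : x ∈ STAGE_ORDER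
  · have hfu : (q ++ [x]).filter (fun y => decide (y ∉ STAGE_ORDER))
        = q.filter (fun y => decide (y ∉ STAGE_ORDER)) := by
      simp [List.filter_append, hx]
    rw [hfu, pvFilt, pvFilt]
    simp only [STAGE_ORDER, List.mem_cons, List.not_mem_nil, or_false] at hx
    rcases hx with hx | hx | hx <;> subst hx <;>
      simp only [List.mem_append, List.mem_singleton, String.reduceEq, or_false, or_true,
        if_true, if_neg hq, List.nil_append]
    · -- x = "SEARCH"
      by_cases h1 : "BRIGHTDATA" ∈ q
      · by_cases h2 : "LLM_FIT" ∈ q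
        · rw [if_pos h1, if_pos h2]
          simp only [List.cons_append]
          rw [pvInsertBy_cons, pvdSB]
          simp
        · rw [if_pos h1, if_neg h2]
          simp only [List.cons_append, List.append_nil, List.nil_append]
          rw [pvInsertBy_cons, pvdSB]
          simp
      · by_cases h2 : "LLM_FIT" ∈ q
        · rw [if_neg h1, if_pos h2]
          simp only [List.cons_append, List.nil_append]
          rw [pvInsertBy_cons, pvdSL]
          simp
        · rw [if_neg h1, if_neg h2]
          simp only [List.nil_append, List.append_nil]
          rw [pvInsertBy_unknowns _ pvkS _ hf1]
          simp
    · -- x = "BRIGHTDATA"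
      by_cases h0 : "SEARCH" ∈ q
      · by_cases h2 : "LLM_FIT" ∈ q
        · rw [if_pos h0, if_pos h2]
          simp only [List.cons_append, List.nil_append]
          rw [pvInsertBy_cons, pvdBS]
          simp only [Bool.false_eq_true, if_false]
          rw [pvInsertBy_cons, pvdBL]
          simp
        · rw [if_pos h0, if_neg h2]
          simp only [List.cons_append, List.append_nil, List.nil_append]
          rw [pvInsertBy_cons, pvdBS]
          simp only [Bool.false_eq_true, if_false]
          rw [pvInsertBy_unknowns _ pvkB _ hf1]
      · by_cases h2 : "LLM_FIT" ∈ q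
        · rw [if_neg h0, if_pos h2]
          simp only [List.cons_append, List.nil_append]
          rw [pvInsertBy_cons, pvdBL]
          simp
        · rw [if_neg h0, if_neg h2]
          simp only [List.nil_append, List.append_nil]
          rw [pvInsertBy_unknowns _ pvkB _ hf1]
          simp
    · -- x = "LLM_FIT"
      by_cases h0 : "SEARCH" ∈ q
      · by_cases h1 : "BRIGHTDATA" ∈ q
        · rw [if_pos h0, if_pos h1]
          simp only [List.cons_append, List.nil_append]
          rw [pvInsertBy_cons, pvdLS]
          simp only [Bool.false_eq_true, if_false]
          rw [pvInsertBy_cons, pvdLB]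
          simp only [Bool.false_eq_true, if_false]
          rw [pvInsertBy_unknowns _ pvkL _ hf1]
        · rw [if_pos h0, if_neg h1]
          simp only [List.cons_append, List.append_nil, List.nil_append]
          rw [pvInsertBy_cons, pvdLS]
          simp only [Bool.false_eq_true, if_false]
          rw [pvInsertBy_unknowns _ pvkL _ hf1]
      · by_cases h1 : "BRIGHTDATA" ∈ q
        · rw [if_neg h0, if_pos h1]
          simp only [List.cons_append, List.nil_append]
          rw [pvInsertBy_cons, pvdLB]
          simp only [Bool.false_eq_true, if_false]
          rw [pvInsertBy_unknowns _ pvkL _ hf1]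
        · rw [if_neg h0, if_neg h1]
          simp only [List.nil_append, List.append_nil]
          rw [pvInsertBy_unknowns _ pvkL _ hf1]
          simp
  · have hkx : pvKey x = 3 := pvKey_unknown x hx
    have hall : ∀ y ∈ STAGE_ORDER.filter (fun s => decide (s ∈ q))
        ++ q.filter (fun y => decide (y ∉ STAGE_ORDER)),
        (fun a b => decide (pvKey a < pvKey b)) x y = false := by
      intro y _
      have := pvKey_le y
      simp only [hkx, decide_eq_false_iff_not, not_lt]
      omega
    rw [PySem.List.insertBy_of_forall_not_before _ _ _ hall]
    have hkq : STAGE_ORDER.filter (fun s => decide (s ∈ q ++ [x]))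
        = STAGE_ORDER.filter (fun s => decide (s ∈ q)) := by
      apply List.filter_congr
      intro s hs
      have hne : s ≠ x := fun e => hx (e ▸ hs)
      simp [List.mem_append, hne]
    have hfu : (q ++ [x]).filter (fun y => decide (y ∉ STAGE_ORDER))
        = q.filter (fun y => decide (y ∉ STAGE_ORDER)) ++ [x] := by
      simp [List.filter_append, hx]
    rw [hkq, hfu, List.append_assoc]

-- A's stable sort of a duplicate-free list is B's partition
lemma pvSortPart (n : List String) (hn : n.Nodup) :
    PySem.List.sorted n pvKey false
      = STAGE_ORDER.filter (fun s => decide (s ∈ n)) ++ n.filter (fun y => decide (y ∉ STAGE_ORDER)) := by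
  rw [PySem.List.sorted_eq_foldl_insertBy]
  induction n using List.reverseRecOn with
  | nil => simp [STAGE_ORDER]
  | append_singleton q x ih =>
      have hq : q.Nodup := hn.sublist (List.sublist_append_left _ _)
      have hx : x ∉ q := by
        rw [List.nodup_append] at hn
        have h' : ∀ a ∈ q, ¬ a = x := by simpa using hn.2.2
        exact fun hxq => h' x hxq rfl
      rw [List.foldl_append, List.foldl_cons, List.foldl_nil, ih hq]
      exact pvInsert_step x q hx

-- ===== VERDICT (by name: the statement is the Claim_ definition above) =====
theorem normalize_completed_stages_spec : Claim_equal_normalize_completed_stages := by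
  intro existing stage _
  unfold Spec_normalize_completed_stages
  obtain ⟨he, hinv⟩ := pvLoops existing PySem.Dict.empty []
    (by intro u; simp [PySem.Dict.contains_empty])
  have hnd : (existing.foldl pvStepB []).Nodup := pvNodupB existing [] List.nodup_nil
  cases stage with
  | none =>
      simp only [normalize_completed_stages, normalize_completed_stages_alt]
      rw [pvKeyA_eq]
      simp only [he]
      exact pvSortPart _ hnd
  | some s =>
      simp only [normalize_completed_stages, normalize_completed_stages_alt]
      rw [pvKeyA_eq]
      simp only [he]
      rw [he] at hinv
      by_cases hs : s = ""
      · simp only [if_pos hs]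
        exact pvSortPart _ hnd
      · simp only [if_neg hs]
        by_cases hm : PySem.Str.upper s ∈ existing.foldl pvStepB []
        · have hc : (existing.foldl pvStepA (PySem.Dict.empty, [])).1.contains
              (PySem.Str.upper s) = true := (hinv _).mpr hm
          simp only [hc, Bool.not_true, Bool.false_eq_true, if_false, if_neg (not_not_intro hm)]
          exact pvSortPart _ hnd
        · have hc : (existing.foldl pvStepA (PySem.Dict.empty, [])).1.contains
              (PySem.Str.upper s) = false := by
            cases hcc : (existing.foldl pvStepA (PySem.Dict.empty, [])).1.contains
                (PySem.Str.upper s)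
            · rfl
            · exact absurd ((hinv _).mp hcc) hm
          simp only [hc, Bool.not_false, reduceIte, if_pos hm]
          exact pvSortPart _ (by
            simp [List.nodup_append, hnd]
            exact fun a ha e => hm (e ▸ ha))
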